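-- pv_equiv track=rewrite | github.com/chelseaChen0104/world_model_termination_spa | scripts/progress_sudoku4.py | _has_duplicate_nonzero
-- ===== SOURCE A (Python) =====
-- def _has_duplicate_nonzero(values) -> bool:
--     """True if some non-zero value appears more than once. Empty (0) cells ignored."""
--     seen = set()
--     for v in values:
--         if v == 0:
--             continue
--         if v in seen:
--             return True
--         seen.add(v)
--     return False
-- ===== SOURCE B (Python) =====
-- def _has_duplicate_nonzero(values) -> bool:
--     """True if some non-zero value appears more than once. Empty (0) cells ignored."""
--     nz = [v for v in values if v != 0]
--     return len(nz) != len(set(nz))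
-- ===== Notes on version B (the rewrite author's own statement) =====
-- stated objective: simpler
-- what changed: B filters the nonzero values once and decides by comparing the list's length with its set's cardinality, replacing A's incremental seen-set loop with early return.
import Mathlib
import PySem

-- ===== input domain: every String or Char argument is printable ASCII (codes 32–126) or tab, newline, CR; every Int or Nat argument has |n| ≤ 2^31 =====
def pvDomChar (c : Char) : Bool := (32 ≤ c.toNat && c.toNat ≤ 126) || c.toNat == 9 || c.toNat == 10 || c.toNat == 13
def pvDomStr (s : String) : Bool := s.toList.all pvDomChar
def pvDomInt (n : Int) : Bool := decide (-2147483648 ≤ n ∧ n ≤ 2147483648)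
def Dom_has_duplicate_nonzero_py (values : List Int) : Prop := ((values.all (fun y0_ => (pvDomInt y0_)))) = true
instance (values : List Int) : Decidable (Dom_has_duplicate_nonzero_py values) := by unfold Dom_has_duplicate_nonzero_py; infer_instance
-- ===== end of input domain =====

-- B filters the nonzero values once and compares list length with set cardinality instead of A's early-exit seen-set loop (simpler decomposition).


-- ===== PORT A =====
-- the 'for v in values' loop with accumulator 'seen' and early returns
def hdnLoop (seen : PySem.Set Int) : List Int → Bool
  | [] => false
  | v :: rest =>
    if v = 0 then hdnLoop seen rest
    else if PySem.Set.contains seen v then true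
    else hdnLoop (PySem.Set.add seen v) rest

def has_duplicate_nonzero_py (values : List Int) : Bool :=
  hdnLoop PySem.Set.empty values

-- ===== PORT B =====
def has_duplicate_nonzero_py_alt (values : List Int) : Bool :=
  let nz := values.filter (fun v => v ≠ 0)
  decide (nz.length ≠ (PySem.Set.ofList nz).length)

-- ===== PRECONDITION & SPEC =====
def Spec_has_duplicate_nonzero_py (values : List Int) (out : Bool) : Prop := out = has_duplicate_nonzero_py_alt values
instance (values : List Int) (out : Bool) : Decidable (Spec_has_duplicate_nonzero_py values out) := by unfold Spec_has_duplicate_nonzero_py; infer_instance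

-- ===== CLAIM (what is proved, stated in full; the proofs are below) =====
def Claim_equal_has_duplicate_nonzero_py : Prop := ∀ (values : List Int), Dom_has_duplicate_nonzero_py values → Spec_has_duplicate_nonzero_py values (has_duplicate_nonzero_py values)

-- ===== LEMMAS AND PROOFS =====

lemma foldl_add_length_le (xs : List Int) : ∀ (s : PySem.Set Int),
    (xs.foldl PySem.Set.add s).length ≤ xs.length + s.length := by
  induction xs with
  | nil => intro s; simp
  | cons x xs ih =>
    intro s
    simp only [List.foldl_cons, List.length_cons]
    have := ih (PySem.Set.add s x)
    have hadd : (PySem.Set.add s x).length ≤ s.length + 1 := by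
      unfold PySem.Set.add
      split <;> simp
    omega

lemma foldl_add_length_eq_iff (xs : List Int) : ∀ (s : PySem.Set Int),
    ((xs.foldl PySem.Set.add s).length = xs.length + s.length)
      ↔ (xs.Nodup ∧ ∀ x ∈ xs, x ∉ s) := by
  induction xs with
  | nil => intro s; simp
  | cons x xs ih =>
    intro s
    simp only [List.foldl_cons, List.length_cons, List.nodup_cons, List.mem_cons]
    by_cases hx : x ∈ s
    · have hadd : PySem.Set.add s x = s := by
        unfold PySem.Set.add
        simp [PySem.Set.contains, hx]
      rw [hadd]
      constructor
      · intro h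
        have := foldl_add_length_le xs s
        omega
      · rintro ⟨_, h⟩
        exact absurd hx (h x (Or.inl rfl))
    · have hadd : PySem.Set.add s x = s ++ [x] := by
        unfold PySem.Set.add
        simp [PySem.Set.contains, hx]
      have h1 : xs.length + 1 + List.length s = xs.length + List.length (s ++ [x]) := by
        simp [List.length_append]; omega
      rw [hadd, h1, ih]
      simp only [List.mem_append, List.mem_singleton]
      constructor
      · rintro ⟨hnd, h⟩
        refine ⟨⟨fun hmem => (h x hmem) (Or.inr rfl), hnd⟩, fun y hy => ?_⟩
        rcases hy with rfl | hy
        · exact hx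
        · exact fun hys => h y hy (Or.inl hys)
      · rintro ⟨⟨hxn, hnd⟩, h⟩
        refine ⟨hnd, fun y hy => ?_⟩
        rintro (hys | rfl)
        · exact h y (Or.inr hy) hys
        · exact hxn hy

lemma hdnLoop_true_iff (xs : List Int) : ∀ (seen : PySem.Set Int),
    hdnLoop seen xs = true ↔
      ¬((xs.filter (fun v : Int => decide (v ≠ 0))).Nodup ∧
        ∀ x ∈ xs.filter (fun v : Int => decide (v ≠ 0)), x ∉ seen) := by
  induction xs with
  | nil => intro seen; simp [hdnLoop]
  | cons v xs ih =>
    intro seen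
    by_cases hv : v = 0
    · subst hv
      simp [hdnLoop, ih]
    · have hf : (v :: xs).filter (fun v : Int => decide (v ≠ 0))
          = v :: xs.filter (fun v : Int => decide (v ≠ 0)) := by
        simp [hv]
      by_cases hvs : v ∈ seen
      · have hc : PySem.Set.contains seen v = true := by
          simp [PySem.Set.contains, hvs]
        simp only [hdnLoop, if_neg hv, hc, if_true, hf, true_iff]
        rintro ⟨-, h⟩
        exact h v (by simp [hv]) hvs
      · have hc : PySem.Set.contains seen v = false := by
          simp [PySem.Set.contains, hvs]
        have hadd : PySem.Set.add seen v = seen ++ [v] := by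
          unfold PySem.Set.add
          simp [PySem.Set.contains, hvs]
        simp only [hdnLoop, if_neg hv, hc, Bool.false_eq_true, if_false, hadd]
        rw [ih, hf]
        simp only [List.nodup_cons, List.mem_cons, List.mem_append, List.not_mem_nil, or_false]
        constructor
        · intro hn
          rintro ⟨⟨hvn, hnd⟩, h⟩
          apply hn
          refine ⟨hnd, fun y hy => ?_⟩
          rintro (hys | rfl)
          · exact h y (Or.inr hy) hys
          · exact hvn hy
        · intro hn
          rintro ⟨hnd, h⟩
          apply hn
          refine ⟨⟨fun hmem => (h v hmem) (Or.inr rfl), hnd⟩, fun y hy => ?_⟩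
          rcases hy with rfl | hy
          · exact hvs
          · exact fun hys => h y hy (Or.inl hys)

lemma nodup_iff_len (xs : List Int) : (PySem.Set.ofList xs).length = xs.length ↔ xs.Nodup := by
  have h := foldl_add_length_eq_iff xs []
  simp only [List.length_nil, Nat.add_zero, List.not_mem_nil, not_false_iff, implies_true,
    and_true] at h
  rw [PySem.Set.ofList_eq_foldl]
  exact h

-- ===== VERDICT (by name: the statement is the Claim_ definition above) =====
theorem has_duplicate_nonzero_py_spec : Claim_equal_has_duplicate_nonzero_py := by
  intro values _
  unfold Spec_has_duplicate_nonzero_py has_duplicate_nonzero_py has_duplicate_nonzero_py_alt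
  rw [Bool.eq_iff_iff, hdnLoop_true_iff]
  have h := nodup_iff_len (values.filter (fun v : Int => decide (v ≠ 0)))
  simp only [PySem.Set.empty, List.not_mem_nil, not_false_iff, implies_true, and_true,
    decide_eq_true_eq, ne_eq]
  rw [eq_comm]
  exact not_congr h.symm
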